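-- pv_equiv track=rewrite | github.com/gavieeen/simulations | LCQ/test6.py | method_append
-- ===== SOURCE A (Python) =====
-- def method_append(a):
--     n = len(a)
--     a_sum = 0
--     pow10_of_a = []
--
--     for ai in a:
--         pow10_of_a.append(10 ** len(str(ai)))
--         a_sum += ai
--
--     return sum(a[i] * pow10_of_a[j] for i in range(n) for j in range(n)) + (a_sum * n)
-- ===== SOURCE B (Python) =====
-- def method_append(a):
--     s = sum(a)
--     p = sum(10 ** len(str(x)) for x in a)
--     return s * (p + len(a))
-- ===== Notes on version B (the rewrite author's own statement) =====
-- stated objective: faster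
-- what changed: Factored the O(n^2) double sum sum_{i,j} a[i]*pow10[j] into the product sum(a)*sum(pow10), and folded in the a_sum*n term, giving a single O(n) pass with no index arithmetic.
import Mathlib
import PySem

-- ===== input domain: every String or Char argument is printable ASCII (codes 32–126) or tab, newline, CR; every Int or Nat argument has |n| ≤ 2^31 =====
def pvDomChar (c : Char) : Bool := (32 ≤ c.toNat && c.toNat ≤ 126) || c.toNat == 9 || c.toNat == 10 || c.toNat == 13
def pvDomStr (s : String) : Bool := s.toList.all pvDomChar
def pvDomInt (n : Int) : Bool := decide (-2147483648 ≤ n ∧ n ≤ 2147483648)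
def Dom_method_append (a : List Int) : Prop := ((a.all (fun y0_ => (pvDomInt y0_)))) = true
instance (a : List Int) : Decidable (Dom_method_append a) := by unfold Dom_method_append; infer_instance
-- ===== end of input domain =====

-- B changes: the O(n^2) double sum is factored into sum(a) * (sum(pow10) + n), one O(n) pass (objective: faster).

-- ===== PORT A =====
-- the loop over a building pow10_of_a and a_sum, as a fold over the pair state
def method_append (a : List Int) : Int :=
  let n : Int := a.length
  let st := a.foldl
    (fun (s : List Int × Int) ai => (s.1 ++ [(10 : Int) ^ (PySem.Int.toChars ai).length], s.2 + ai))
    ([], 0)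
  let pow10_of_a := st.1
  let a_sum := st.2
  ((PySem.List.pyRange 0 n 1).map (fun i =>
     ((PySem.List.pyRange 0 n 1).map (fun j =>
        PySem.List.pyGetD a i 0 * PySem.List.pyGetD pow10_of_a j 0)).sum)).sum
  + a_sum * n

-- ===== PORT B =====
def method_append_alt (a : List Int) : Int :=
  let s := a.sum
  let p := (a.map (fun x => (10 : Int) ^ (PySem.Int.toChars x).length)).sum
  s * (p + a.length)

-- ===== PRECONDITION & SPEC =====
def Spec_method_append (a : List Int) (out : Int) : Prop := out = method_append_alt a
instance (a : List Int) (out : Int) : Decidable (Spec_method_append a out) := by unfold Spec_method_append; infer_instance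

-- ===== CLAIM (what is proved, stated in full; the proofs are below) =====
def Claim_equal_method_append : Prop := ∀ (a : List Int), Dom_method_append a → Spec_method_append a (method_append a)

-- ===== LEMMAS AND PROOFS =====

-- A's loop produces (map of the pow10 function, sum of a)
theorem pv_foldl_pair (a : List Int) (acc : List Int) (s : Int) :
    a.foldl
      (fun (st : List Int × Int) ai => (st.1 ++ [(10 : Int) ^ (PySem.Int.toChars ai).length], st.2 + ai))
      (acc, s)
    = (acc ++ a.map (fun ai => (10 : Int) ^ (PySem.Int.toChars ai).length), s + a.sum) := by
  induction a generalizing acc s with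
  | nil => simp
  | cons x xs ih => simp [List.foldl, ih]; ring

-- sum over range of xs.length of x * xs[j] equals x * xs.sum
theorem pv_inner_sum (x : Int) (xs : List Int) :
    ((PySem.List.pyRange 0 (xs.length : Int) 1).map (fun j => x * PySem.List.pyGetD xs j 0)).sum
      = x * xs.sum := by
  have h : (PySem.List.pyRange 0 (xs.length : Int) 1).map (fun j => PySem.List.pyGetD xs j 0) = xs :=
    PySem.List.map_pyGetD_pyRange_zero' xs 0
  have hcomp : (fun j => x * PySem.List.pyGetD xs j 0)
      = (fun y => x * y) ∘ (fun j => PySem.List.pyGetD xs j 0) := rfl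
  rw [hcomp, ← List.map_map, h]
  simpa using List.sum_map_mul_left xs id x

-- ===== VERDICT (by name: the statement is the Claim_ definition above) =====
theorem method_append_spec : Claim_equal_method_append := by
  intro a _
  show method_append a = method_append_alt a
  unfold method_append method_append_alt
  simp only [pv_foldl_pair, List.nil_append, Int.zero_add]
  set f : Int → Int := fun ai => (10 : Int) ^ (PySem.Int.toChars ai).length with hf
  have hlen : ((a.map f).length : Int) = (a.length : Int) := by simp
  have hinner : ∀ i : Int,
      ((PySem.List.pyRange 0 (a.length : Int) 1).map (fun j =>
        PySem.List.pyGetD a i 0 * PySem.List.pyGetD (a.map f) j 0)).sum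
      = PySem.List.pyGetD a i 0 * (a.map f).sum := by
    intro i
    rw [← hlen]
    exact pv_inner_sum (PySem.List.pyGetD a i 0) (a.map f)
  calc ((PySem.List.pyRange 0 (a.length : Int) 1).map (fun i =>
          ((PySem.List.pyRange 0 (a.length : Int) 1).map (fun j =>
            PySem.List.pyGetD a i 0 * PySem.List.pyGetD (a.map f) j 0)).sum)).sum
        + a.sum * (a.length : Int)
      = ((PySem.List.pyRange 0 (a.length : Int) 1).map (fun i =>
          PySem.List.pyGetD a i 0 * (a.map f).sum)).sum + a.sum * (a.length : Int) := by
        simp only [hinner]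
    _ = a.sum * (a.map f).sum + a.sum * (a.length : Int) := by
        have h := pv_inner_sum ((a.map f).sum) a
        simp only [Int.mul_comm] at h ⊢
        rw [h]
    _ = a.sum * ((a.map f).sum + (a.length : Int)) := by ring
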